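-- pv_equiv track=rewrite | github.com/avaines/advent_of_code | 2024/Day 9 Disk Fragmenter/main.py | find_group_indexes
-- ===== SOURCE A (Python) =====
-- def find_group_indexes(lst, character):
--     groups = []
--     start = None
--     for i, val in enumerate(lst):
--         if val == character:
--             if start is None:
--                 start = i
--         else:
--             if start is not None:
--                 groups.append((start, i - 1))
--                 start = None
--
--     if start is not None:
--         groups.append((start, len(lst) - 1))
--
--     return groups
-- ===== SOURCE B (Python) =====
-- def find_group_indexes(lst, character):
--     groups = []
--     i = 0
--     n = len(lst)
--     while i < n:
--         j = i
--         while j < n and lst[j] == lst[i]: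
--             j += 1
--         if lst[i] == character:
--             groups.append((i, j - 1))
--         i = j
--     return groups
-- ===== Notes on version B (the rewrite author's own statement) =====
-- stated objective: alternative
-- what changed: Replaces A's element-by-element start/None state machine with a run-scanning two-pointer loop that advances over each maximal run of equal elements at once and emits (start, end) directly for runs of the target.
import Mathlib
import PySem

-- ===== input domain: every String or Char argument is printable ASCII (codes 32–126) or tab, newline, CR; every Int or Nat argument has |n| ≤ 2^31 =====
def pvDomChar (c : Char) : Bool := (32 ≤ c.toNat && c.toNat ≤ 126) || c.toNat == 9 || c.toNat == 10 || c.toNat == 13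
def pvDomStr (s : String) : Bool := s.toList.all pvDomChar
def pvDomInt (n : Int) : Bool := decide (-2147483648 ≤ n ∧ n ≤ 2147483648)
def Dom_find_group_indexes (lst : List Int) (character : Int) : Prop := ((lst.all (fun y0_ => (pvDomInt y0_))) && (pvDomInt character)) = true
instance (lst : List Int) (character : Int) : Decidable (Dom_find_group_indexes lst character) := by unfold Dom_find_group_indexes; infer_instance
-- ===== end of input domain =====

-- B replaces A's element-by-element start/None state machine with a run-scanning
-- two-pointer loop that jumps over each maximal run of equal elements at once (alternative decomposition).

-- ===== PORT A =====
-- the for-loop of A: state = (groups, start); i is the current index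
def aGo (character : Int) : List Int → Int → (List (Int × Int) × Option Int) → (List (Int × Int) × Option Int)
  | [], _, st => st
  | v :: rest, i, (groups, start) =>
      if v == character then
        aGo character rest (i + 1) (groups, match start with | none => some i | some s => some s)
      else
        match start with
        | some s => aGo character rest (i + 1) (groups ++ [(s, i - 1)], none)
        | none => aGo character rest (i + 1) (groups, none)

-- the trailing "if start is not None: groups.append((start, len(lst)-1))"
def aFinish (st : List (Int × Int) × Option Int) (e : Int) : List (Int × Int) :=
  match st.2 with
  | some s => st.1 ++ [(s, e)]
  | none => st.1

def find_group_indexes (lst : List Int) (character : Int) : List (Int × Int) :=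
  aFinish (aGo character lst 0 ([], none)) ((lst.length : Int) - 1)

-- ===== PORT B =====
-- Source B's outer while: at index i with remaining list x :: xs; the inner while
-- (advance j over the run of elements equal to lst[i]) is takeWhile/dropWhile on the tail
def bGo (character : Int) : List Int → Int → List (Int × Int)
  | [], _ => []
  | x :: xs, i =>
      let run := xs.takeWhile (fun y => y == x)
      let rest := xs.dropWhile (fun y => y == x)
      let j := i + 1 + (run.length : Int)
      if x == character then (i, j - 1) :: bGo character rest j else bGo character rest j
termination_by l _ => l.length
decreasing_by
  all_goals simp only [List.length_cons]
  all_goals exact Nat.lt_succ_of_le (List.length_dropWhile_le _ _)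

def find_group_indexes_alt (lst : List Int) (character : Int) : List (Int × Int) :=
  bGo character lst 0

-- ===== PRECONDITION & SPEC =====
def Spec_find_group_indexes (lst : List Int) (character : Int) (out : List (Int × Int)) : Prop := out = find_group_indexes_alt lst character
instance (lst : List Int) (character : Int) (out : List (Int × Int)) : Decidable (Spec_find_group_indexes lst character out) := by unfold Spec_find_group_indexes; infer_instance

-- ===== CLAIM (what is proved, stated in full; the proofs are below) =====
def Claim_equal_find_group_indexes : Prop := ∀ (lst : List Int) (character : Int), Dom_find_group_indexes lst character → Spec_find_group_indexes lst character (find_group_indexes lst character)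

-- ===== LEMMAS AND PROOFS =====

-- accumulator lemma: groups already collected are just prepended
theorem aGo_acc (c : Int) (l : List Int) : ∀ (i : Int) (gs : List (Int × Int)) (st : Option Int),
    aGo c l i (gs, st) = (gs ++ (aGo c l i ([], st)).1, (aGo c l i ([], st)).2) := by
  induction l with
  | nil => intro i gs st; simp [aGo]
  | cons v rest ih =>
    intro i gs st
    cases hb : (v == c) with
    | true =>
      simp only [aGo, hb, if_true]
      rw [ih (i+1) gs, ih (i+1) []]
    | false =>
      cases st with
      | none =>
        simp only [aGo, hb, Bool.false_eq_true, if_false]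
        rw [ih (i+1) gs, ih (i+1) []]
      | some s =>
        simp only [aGo, hb, Bool.false_eq_true, if_false]
        rw [ih (i+1) (gs ++ [(s, i-1)])]
        simp only [List.nil_append]
        rw [ih (i+1) [(s, i-1)]]
        simp

-- running through a run of the target character with start already set
theorem aGo_run_eq (c : Int) (t : List Int) (h : ∀ y ∈ t, y = c) :
    ∀ (d : List Int) (i s : Int),
    aGo c (t ++ d) i ([], some s) = aGo c d (i + (t.length : Int)) ([], some s) := by
  induction t with
  | nil => intro d i s; simp
  | cons y ys ih =>
    intro d i s
    have hy : (y == c) = true := by simp [h y (by simp)]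
    have hys : ∀ z ∈ ys, z = c := fun z hz => h z (by simp [hz])
    simp only [List.cons_append, aGo, hy, if_true]
    rw [ih hys d (i+1) s]
    have : i + 1 + (ys.length : Int) = i + ((y :: ys).length : Int) := by
      simp only [List.length_cons]; push_cast; ring
    rw [this]

-- running through a run of non-target characters with start unset
theorem aGo_run_ne (c : Int) (t : List Int) (h : ∀ y ∈ t, y ≠ c) :
    ∀ (d : List Int) (i : Int),
    aGo c (t ++ d) i ([], none) = aGo c d (i + (t.length : Int)) ([], none) := by
  induction t with
  | nil => intro d i; simp
  | cons y ys ih =>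
    intro d i
    have hy : (y == c) = false := by simp [h y (by simp)]
    have hys : ∀ z ∈ ys, z ≠ c := fun z hz => h z (by simp [hz])
    simp only [List.cons_append, aGo, hy, Bool.false_eq_true, if_false]
    rw [ih hys d (i+1)]
    have : i + 1 + (ys.length : Int) = i + ((y :: ys).length : Int) := by
      simp only [List.length_cons]; push_cast; ring
    rw [this]

theorem dropWhile_head_false {p : Int → Bool} {xs : List Int} {y : Int} {ys : List Int}
    (h : xs.dropWhile p = y :: ys) : p y = false := by
  induction xs with
  | nil => simp [List.dropWhile] at h
  | cons a as ih =>
    rw [List.dropWhile_cons] at h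
    by_cases hp : p a
    · exact ih (by simpa [hp] using h)
    · simp only [hp] at h
      cases h
      simpa using hp

theorem main_lemma (c : Int) : ∀ (n : ℕ) (l : List Int), l.length ≤ n → ∀ (i : Int),
    aFinish (aGo c l i ([], none)) (i + (l.length : Int) - 1) = bGo c l i := by
  intro n
  induction n with
  | zero =>
    intro l hl i
    have : l = [] := List.eq_nil_of_length_eq_zero (Nat.le_zero.mp hl)
    subst this; simp [aGo, aFinish, bGo]
  | succ n ih =>
    intro l hl i
    cases l with
    | nil => simp [aGo, aFinish, bGo]
    | cons x xs =>
      set t := xs.takeWhile (fun y => y == x) with ht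
      set d := xs.dropWhile (fun y => y == x) with hd
      have hxs : t ++ d = xs := List.takeWhile_append_dropWhile
      have htall : ∀ y ∈ t, y = x := by
        intro y hy
        have := List.mem_takeWhile_imp (ht ▸ hy)
        simpa using this
      have hlen : xs.length = t.length + d.length := by
        rw [← hxs]; simp
      have hdn : d.length ≤ n := by
        have : xs.length ≤ n := by simpa using hl
        omega
      set j := i + 1 + (t.length : Int) with hj
      have he : i + ((x :: xs).length : Int) - 1 = j + (d.length : Int) - 1 := by
        simp only [hj, List.length_cons, hlen]; push_cast; ring
      have hbGo : bGo c (x :: xs) i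
          = if (x == c) then (i, j - 1) :: bGo c d j else bGo c d j := by
        rw [bGo]
      cases hxcb : (x == c) with
      | true =>
        have hxc : x = c := by simpa using hxcb
        have htallc : ∀ y ∈ t, y = c := fun y hy => (htall y hy).trans hxc
        have h1 : aGo c (x :: xs) i ([], none) = aGo c d j ([], some i) := by
          simp only [aGo, hxcb, if_true]
          rw [← hxs, aGo_run_eq c t htallc d (i+1) i, hj]
        rw [h1, he, hbGo, hxcb, if_pos rfl]
        cases hdc : d with
        | nil =>
          simp only [aGo, aFinish, bGo]
          simp
        | cons y ys =>
          have hdd : xs.dropWhile (fun y => y == x) = y :: ys := by rw [← hd]; exact hdc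
          have hy : (y == x) = false := dropWhile_head_false (p := fun y => y == x) hdd
          have hyc : (y == c) = false := by rw [← hxc]; exact hy
          have h2 : aGo c (y :: ys) j ([], some i) = aGo c ys (j + 1) ([(i, j - 1)], none) := by
            simp [aGo, hyc]
          have h3 : aGo c (y :: ys) j ([], none) = aGo c ys (j + 1) ([], none) := by
            simp [aGo, hyc]
          rw [h2, aGo_acc]
          have hfin : aFinish ([(i, j-1)] ++ (aGo c ys (j+1) ([], none)).1,
              (aGo c ys (j+1) ([], none)).2) (j + ((y :: ys).length : Int) - 1)
              = (i, j-1) :: aFinish (aGo c ys (j+1) ([], none)) (j + ((y :: ys).length : Int) - 1) := by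
            unfold aFinish
            cases (aGo c ys (j+1) ([], none)).2 <;> simp
          rw [hfin, ← h3, ih (y :: ys) (hdc ▸ hdn) j]
      | false =>
        have hxc : x ≠ c := by simpa using hxcb
        have htallnc : ∀ y ∈ t, y ≠ c := fun y hy => (htall y hy) ▸ hxc
        have h1 : aGo c (x :: xs) i ([], none) = aGo c d j ([], none) := by
          simp only [aGo, hxcb, Bool.false_eq_true, if_false]
          rw [← hxs, aGo_run_ne c t htallnc d (i+1), hj]
        rw [h1, he, ih d hdn j, hbGo, hxcb, if_neg (by simp)]

-- ===== VERDICT (by name: the statement is the Claim_ definition above) =====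
theorem find_group_indexes_spec : Claim_equal_find_group_indexes := by
  intro lst c _
  unfold Spec_find_group_indexes find_group_indexes find_group_indexes_alt
  have := main_lemma c lst.length lst le_rfl 0
  simpa using this
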